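-- pv_equiv track=rewrite | github.com/vayalet/Exercise-performance-DL | utils/tools.py | get_label_sequences
-- ===== SOURCE A (Python) =====
-- def get_label_sequences(labels, target_label):
--     """
--     Finds the start and end indices of sequences where the label equals the target_label.
--
--     Parameters:
--         labels (list or array): List or array of labels.
--         target_label (int): The target label to identify sequences for.
--
--     Returns:
--         list of tuples: Each tuple contains (start_index, end_index) for a sequence.
--     """
--     sequences = []
--     start = None
--
--     for i, label in enumerate(labels):
--         if label == target_label and start is None:  # Start of a new sequence
--             start = i
--         elif label != target_label and start is not None:  # End of a sequence
--             sequences.append((start, i - 1))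
--             start = None
--
--     # Handle the case where a sequence ends at the last label
--     if start is not None:
--         sequences.append((start, len(labels) - 1))
--
--     return sequences
-- ===== SOURCE B (Python) =====
-- def get_label_sequences(labels, target_label):
--     """Run-skipping scan: jump to the end of each target run directly."""
--     res = []
--     n = len(labels)
--     i = 0
--     while i < n:
--         if labels[i] == target_label:
--             j = i
--             while j + 1 < n and labels[j + 1] == target_label:
--                 j += 1
--             res.append((i, j))
--             i = j + 1
--         else:
--             i += 1
--     return res
-- ===== Notes on version B (the rewrite author's own statement) =====
-- stated objective: alternative
-- what changed: Replaces the single-pass scan with an Option start sentinel and post-loop flush by a run-skipping two-level scan that, at each target element, advances directly to the run's last index and emits (start,end) immediately.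
import Mathlib
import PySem

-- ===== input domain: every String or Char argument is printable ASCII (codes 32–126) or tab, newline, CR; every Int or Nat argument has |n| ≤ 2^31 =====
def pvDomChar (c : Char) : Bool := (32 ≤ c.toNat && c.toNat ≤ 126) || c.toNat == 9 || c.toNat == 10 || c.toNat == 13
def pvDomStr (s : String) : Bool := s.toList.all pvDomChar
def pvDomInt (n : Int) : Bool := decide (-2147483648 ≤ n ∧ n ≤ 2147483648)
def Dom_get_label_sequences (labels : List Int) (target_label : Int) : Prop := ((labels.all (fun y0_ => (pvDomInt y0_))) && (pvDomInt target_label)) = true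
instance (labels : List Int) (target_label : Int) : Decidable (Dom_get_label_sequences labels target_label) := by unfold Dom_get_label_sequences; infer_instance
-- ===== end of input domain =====

-- B replaces A's sentinel-state scan by a run-skipping scan: same values, same O(n) cost (objective: alternative).
-- ===== PORT A =====
-- A's for-loop over enumerate(labels) with state (sequences, start); i is the current index,
-- start = none/some s mirrors Python's None/start. After the loop, flush with i = len(labels).
def pyAGo (t : Int) : List Int → Int → List (Int × Int) → Option Int → List (Int × Int)
  | [], i, acc, start =>
      match start with
      | some s => acc ++ [(s, i - 1)]
      | none => acc
  | x :: xs, i, acc, start =>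
      match start with
      | none => if x = t then pyAGo t xs (i + 1) acc (some i) else pyAGo t xs (i + 1) acc none
      | some s => if x = t then pyAGo t xs (i + 1) acc (some s)
                  else pyAGo t xs (i + 1) (acc ++ [(s, i - 1)]) none

def get_label_sequences (labels : List Int) (target_label : Int) : List (Int × Int) :=
  pyAGo target_label labels 0 [] none

-- ===== PORT B =====
-- B's inner while: starting with last confirmed index j, consume matching prefix, return
-- (last index of the run, remaining labels).
def pyRunEnd (t : Int) : List Int → Int → Int × List Int
  | [], j => (j, [])
  | x :: xs, j => if x = t then pyRunEnd t xs (j + 1) else (j, x :: xs)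

theorem pyRunEnd_len (t : Int) (xs : List Int) (j : Int) :
    (pyRunEnd t xs j).2.length ≤ xs.length := by
  induction xs generalizing j with
  | nil => simp [pyRunEnd]
  | cons x xs ih =>
      simp only [pyRunEnd]
      split
      · exact le_trans (ih _) (Nat.le_succ _)
      · simp

-- B's outer while loop, i the current index.
def pyBGo (t : Int) (xs : List Int) (i : Int) : List (Int × Int) :=
  match xs with
  | [] => []
  | x :: rest =>
      if x = t then
        let p := pyRunEnd t rest i
        (i, p.1) :: pyBGo t p.2 (p.1 + 1)
      else
        pyBGo t rest (i + 1)
termination_by xs.length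
decreasing_by
  · exact Nat.lt_succ_of_le (pyRunEnd_len t rest i)
  · simp

def get_label_sequences_alt (labels : List Int) (target_label : Int) : List (Int × Int) :=
  pyBGo target_label labels 0

-- ===== PRECONDITION & SPEC =====
def Spec_get_label_sequences (labels : List Int) (target_label : Int) (out : List (Int × Int)) : Prop := out = get_label_sequences_alt labels target_label
instance (labels : List Int) (target_label : Int) (out : List (Int × Int)) : Decidable (Spec_get_label_sequences labels target_label out) := by unfold Spec_get_label_sequences; infer_instance

-- ===== CLAIM (what is proved, stated in full; the proofs are below) =====
def Claim_equal_get_label_sequences : Prop := ∀ (labels : List Int) (target_label : Int), Dom_get_label_sequences labels target_label → Spec_get_label_sequences labels target_label (get_label_sequences labels target_label)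

-- ===== LEMMAS AND PROOFS =====




-- inside a run (start = some s), A's remaining scan is determined by pyRunEnd
theorem aGo_run (t : Int) (xs : List Int) (s i : Int) (acc : List (Int × Int)) :
    pyAGo t xs i acc (some s) =
      pyAGo t (pyRunEnd t xs (i - 1)).2 ((pyRunEnd t xs (i - 1)).1 + 1)
        (acc ++ [(s, (pyRunEnd t xs (i - 1)).1)]) none := by
  induction xs generalizing i with
  | nil => simp [pyAGo, pyRunEnd]
  | cons x xs ih =>
      by_cases hx : x = t
      · have hi : i - 1 + 1 = i := by omega
        have hi2 : i + 1 - 1 = i := by omega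
        have h1 : pyAGo t (x :: xs) i acc (some s) = pyAGo t xs (i + 1) acc (some s) := by
          simp [pyAGo, hx]
        have h2 : pyRunEnd t (x :: xs) (i - 1) = pyRunEnd t xs i := by
          simp only [pyRunEnd, if_pos hx, hi]
        have h3 := ih (i + 1)
        rw [hi2] at h3
        rw [h1, h3, h2]
      · have h2 : pyRunEnd t (x :: xs) (i - 1) = (i - 1, x :: xs) := by
          simp only [pyRunEnd, if_neg hx]
        have hi : i - 1 + 1 = i := by omega
        rw [h2]
        simp only [hi]
        simp [pyAGo, hx]

theorem aGo_eq_bGo (t : Int) (xs : List Int) (i : Int) (acc : List (Int × Int)) :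
    pyAGo t xs i acc none = acc ++ pyBGo t xs i := by
  match xs with
  | [] => simp [pyAGo, pyBGo]
  | x :: rest =>
      by_cases hx : x = t
      · have h1 : pyAGo t (x :: rest) i acc none = pyAGo t rest (i + 1) acc (some i) := by
          simp [pyAGo, hx]
        rw [h1, aGo_run, show (i : Int) + 1 - 1 = i from by omega,
          aGo_eq_bGo t (pyRunEnd t rest i).2 ((pyRunEnd t rest i).1 + 1) _]
        simp [pyBGo, hx]
      · have h1 : pyAGo t (x :: rest) i acc none = pyAGo t rest (i + 1) acc none := by
          simp [pyAGo, hx]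
        rw [h1, aGo_eq_bGo t rest (i + 1) acc]
        simp [pyBGo, hx]
termination_by xs.length
decreasing_by
  · exact Nat.lt_succ_of_le (pyRunEnd_len t rest i)
  · simp

-- ===== VERDICT =====
theorem get_label_sequences_spec : Claim_equal_get_label_sequences := by
  intro labels t _
  unfold Spec_get_label_sequences get_label_sequences get_label_sequences_alt
  simpa using aGo_eq_bGo t labels 0 []
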